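-- pv_equiv track=rewrite | github.com/adikondepudi/stuttering-detection-vast | src/dataset.py | _calculate_adaptive_pool_sizes
-- ===== SOURCE A (Python) =====
-- from typing import Tuple, Dict, Optional, List
--
-- def _calculate_adaptive_pool_sizes(current_frames: int, target_frames: int) -> List[int]:
--     """Calculate adaptive pool sizes for even distribution"""
--     base_pool_size = current_frames // target_frames
--     remainder = current_frames % target_frames
--
--     pool_sizes = []
--     for i in range(target_frames):
--         if i < remainder:
--             pool_sizes.append(base_pool_size + 1)
--         else:
--             pool_sizes.append(base_pool_size)
--
--     return pool_sizes
-- ===== SOURCE B (Python) =====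
-- def _calculate_adaptive_pool_sizes(current_frames: int, target_frames: int) -> list:
--     """Greedy even split: each slot takes the ceiling of remaining/slots left."""
--     sizes = []
--     remaining = current_frames
--     slots = target_frames
--     while slots > 0:
--         size = -(-remaining // slots)  # ceiling division
--         sizes.append(size)
--         remaining -= size
--         slots -= 1
--     return sizes
-- ===== Notes on version B (the rewrite author's own statement) =====
-- stated objective: alternative
-- what changed: Replaces the precomputed quotient/remainder and per-index threshold branch by a greedy loop that never computes them: each slot takes the ceiling of remaining/slots and the budget and slot count are decremented, a classic even-split algorithm.
import Mathlib
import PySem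

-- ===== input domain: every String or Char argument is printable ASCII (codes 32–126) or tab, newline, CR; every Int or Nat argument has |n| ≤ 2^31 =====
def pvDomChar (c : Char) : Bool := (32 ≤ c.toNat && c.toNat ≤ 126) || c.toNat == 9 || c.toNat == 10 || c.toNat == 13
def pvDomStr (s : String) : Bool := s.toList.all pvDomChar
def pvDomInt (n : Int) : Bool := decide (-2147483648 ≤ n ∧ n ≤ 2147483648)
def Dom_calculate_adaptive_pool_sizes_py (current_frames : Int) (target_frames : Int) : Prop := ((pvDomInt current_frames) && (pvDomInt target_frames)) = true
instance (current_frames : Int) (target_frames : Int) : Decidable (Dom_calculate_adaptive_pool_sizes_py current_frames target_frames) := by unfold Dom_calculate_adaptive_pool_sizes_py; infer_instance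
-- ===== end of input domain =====

-- B is a different algorithm: instead of A's precomputed base/remainder with a per-index branch, a greedy loop gives each slot the ceiling of remaining/slots (same cost; return-value equivalence).


-- ===== PORT A =====
def calculate_adaptive_pool_sizes_py (current_frames : Int) (target_frames : Int) : List Int :=
  let base_pool_size := PySem.Int.floordiv current_frames target_frames
  let remainder := PySem.Int.mod current_frames target_frames
  (PySem.List.pyRange 0 target_frames 1).foldl
    (fun pool_sizes i =>
      if i < remainder then pool_sizes ++ [base_pool_size + 1]
      else pool_sizes ++ [base_pool_size]) []

-- ===== PORT B =====
-- B's while loop over 'slots' counting down from target_frames: fuel = slots.toNat, and at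
-- fuel n+1 the current value of 'slots' is (n:Int)+1. '-(-remaining // slots)' transliterated.
def pvGreedyAux (remaining : Int) : Nat → List Int
  | 0 => []
  | n+1 =>
    let slots : Int := (n : Int) + 1
    let size := -(PySem.Int.floordiv (-remaining) slots)
    size :: pvGreedyAux (remaining - size) n

def calculate_adaptive_pool_sizes_py_alt (current_frames : Int) (target_frames : Int) : List Int :=
  pvGreedyAux current_frames target_frames.toNat

-- ===== PRECONDITION & SPEC =====
-- Pre_ excludes exactly target_frames = 0, where Python A raises ZeroDivisionError.
def Pre_calculate_adaptive_pool_sizes_py (current_frames : Int) (target_frames : Int) : Prop := target_frames ≠ 0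
instance (current_frames : Int) (target_frames : Int) : Decidable (Pre_calculate_adaptive_pool_sizes_py current_frames target_frames) := by unfold Pre_calculate_adaptive_pool_sizes_py; infer_instance
def pvWitness_calculate_adaptive_pool_sizes_py : Int × Int := (10, 3)

def Spec_calculate_adaptive_pool_sizes_py (current_frames : Int) (target_frames : Int) (out : List Int) : Prop := out = calculate_adaptive_pool_sizes_py_alt current_frames target_frames
instance (current_frames : Int) (target_frames : Int) (out : List Int) : Decidable (Spec_calculate_adaptive_pool_sizes_py current_frames target_frames out) := by unfold Spec_calculate_adaptive_pool_sizes_py; infer_instance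

-- ===== CLAIM (what is proved, stated in full; the proofs are below) =====
def Claim_equal_calculate_adaptive_pool_sizes_py : Prop := ∀ (current_frames : Int) (target_frames : Int), Dom_calculate_adaptive_pool_sizes_py current_frames target_frames → Pre_calculate_adaptive_pool_sizes_py current_frames target_frames → Spec_calculate_adaptive_pool_sizes_py current_frames target_frames (calculate_adaptive_pool_sizes_py current_frames target_frames)

-- ===== LEMMAS AND PROOFS =====
-- A's loop, made explicit: appending one element per index is mapping over the range.
theorem pv_foldl_append_map (f : Int → Int) (l : List Int) (init : List Int) :
    l.foldl (fun acc i => acc ++ [f i]) init = init ++ l.map f := by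
  induction l generalizing init with
  | nil => simp
  | cons a l ih => simp [List.foldl_cons, ih]

-- The mapped threshold indicator over range n is two constant blocks.
theorem pv_range_ite_eq_replicate (n rn : ℕ) (x y : Int) (h : rn ≤ n) :
    (List.range n).map (fun k : ℕ => if (k : Int) < (rn : Int) then x else y) =
      List.replicate rn x ++ List.replicate (n - rn) y := by
  apply List.ext_getElem
  · simp only [List.length_map, List.length_range, List.length_append, List.length_replicate]
    omega
  · intro i h1 h2
    rw [List.getElem_map, List.getElem_range]
    by_cases hi : i < rn
    · rw [List.getElem_append_left (by simpa using hi), List.getElem_replicate,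
        if_pos (by exact_mod_cast hi)]
    · rw [List.getElem_append_right (by simpa using hi), List.getElem_replicate,
        if_neg (by exact_mod_cast hi)]

-- Port A equals the two uniform blocks (with floor-division quotient/remainder).
theorem pvA_eq_blocks (c t : Int) (ht : t ≠ 0) :
    calculate_adaptive_pool_sizes_py c t =
      List.replicate (PySem.Int.mod c t).toNat (PySem.Int.floordiv c t + 1) ++
        List.replicate (t - PySem.Int.mod c t).toNat (PySem.Int.floordiv c t) := by
  unfold calculate_adaptive_pool_sizes_py
  dsimp only
  set b := PySem.Int.floordiv c t with hb
  set r := PySem.Int.mod c t with hr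
  have hfm : r = c % t + if 0 ≤ t ∨ t ∣ c then 0 else t := by
    rw [hr]; simp [PySem.Int.mod, Int.fmod_eq_emod]
  have hm0 : 0 ≤ c % t := Int.emod_nonneg c ht
  have hm1 : c % t < |t| := by
    rw [← Int.emod_abs]; exact Int.emod_lt_of_pos c (abs_pos.mpr ht)
  have habs : |t| = t ∨ |t| = -t := abs_choice t
  rcases lt_or_gt_of_ne ht with hneg | hpos
  · have hrle : r ≤ 0 ∧ t < r := by
      rw [hfm]; split_ifs with hc
      · rcases hc with hc | hc
        · omega
        · have h0 : c % t = 0 := Int.emod_eq_zero_of_dvd hc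
          omega
      · omega
    rw [PySem.List.pyRange_one_eq_nil (by omega)]
    have h1 : r.toNat = 0 := by omega
    have h2 : (t - r).toNat = 0 := by omega
    simp [h1, h2]
  · have hreq : r = c % t := by
      rw [hfm, if_pos (Or.inl hpos.le), add_zero]
    rw [hreq]
    have hf : (fun (ps : List Int) (i : Int) => if i < c % t then ps ++ [b + 1] else ps ++ [b])
        = fun ps i => ps ++ [if i < c % t then b + 1 else b] := by
      funext ps i; split_ifs <;> rfl
    rw [hf, pv_foldl_append_map, PySem.List.pyRange_one, List.map_map]
    simp only [Function.comp_def, zero_add, List.nil_append]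
    have hfun : (fun k : ℕ => if (k : Int) < c % t then b + 1 else b)
        = fun k : ℕ => if (k : Int) < (((c % t).toNat : ℕ) : Int) then b + 1 else b := by
      funext k; rw [show (((c % t).toNat : ℕ) : Int) = c % t from by omega]
    rw [sub_zero, hfun, pv_range_ite_eq_replicate t.toNat (c % t).toNat (b + 1) b (by omega)]
    congr 2
    omega

-- B's greedy recursion equals the same two blocks (Euclidean quotient/remainder; divisor positive).
theorem pvGreedy_eq_blocks (n : Nat) : ∀ c : Int,
    pvGreedyAux c (n+1) =
      List.replicate (c % ((n : Int)+1)).toNat (c / ((n : Int)+1) + 1) ++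
        List.replicate ((n+1) - (c % ((n : Int)+1)).toNat) (c / ((n : Int)+1)) := by
  induction n with
  | zero =>
    intro c
    simp [pvGreedyAux, PySem.Int.floordiv, Int.fdiv_one]
  | succ n ih =>
    intro c
    set s : Int := (n : Int) + 2 with hs
    have hs0 : (0 : Int) < s := by omega
    have hcast : ((n + 1 : Nat) : Int) + 1 = s := by push_cast; omega
    set b := c / s with hbdef
    set r := c % s with hrdef
    have hr0 : 0 ≤ r := Int.emod_nonneg c (by omega)
    have hr1 : r < s := Int.emod_lt_of_pos c hs0
    have hc : s * b + r = c := Int.mul_ediv_add_emod c s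
    show (let slots : Int := ((n + 1 : Nat) : Int) + 1;
          let size := -(PySem.Int.floordiv (-c) slots);
          size :: pvGreedyAux (c - size) (n+1)) = _
    rw [hcast]
    dsimp only
    by_cases hr : r = 0
    · have hsize : -(PySem.Int.floordiv (-c) s) = b := by
        rw [PySem.Int.neg_floordiv_neg_eq_iff_of_pos hs0]
        constructor <;> nlinarith
      have hc' : c - b = ((n : Int) + 1) * b := by nlinarith
      rw [hsize, ih (c - b), hc']
      have hmod : ((n : Int) + 1) * b % ((n : Int) + 1) = 0 := Int.mul_emod_right _ _
      have hdiv : ((n : Int) + 1) * b / ((n : Int) + 1) = b :=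
        Int.mul_ediv_cancel_left b (by omega)
      rw [hmod, hdiv]
      rw [show (c % s).toNat = 0 from by omega, show c / s = b from hbdef.symm]
      simp [List.replicate_succ]
    · have hrpos : 0 < r := lt_of_le_of_ne hr0 (Ne.symm hr)
      have hsize : -(PySem.Int.floordiv (-c) s) = b + 1 := by
        rw [PySem.Int.neg_floordiv_neg_eq_iff_of_pos hs0]
        constructor <;> nlinarith
      have hc' : c - (b + 1) = (r - 1) + ((n : Int) + 1) * b := by nlinarith
      rw [hsize, ih (c - (b + 1)), hc']
      have hmod : ((r - 1) + ((n : Int) + 1) * b) % ((n : Int) + 1) = r - 1 := by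
        rw [Int.add_mul_emod_self_left, Int.emod_eq_of_lt (by omega) (by omega)]
      have hdiv : ((r - 1) + ((n : Int) + 1) * b) / ((n : Int) + 1) = b := by
        rw [Int.add_mul_ediv_left _ _ (show ((n : Int) + 1) ≠ 0 by omega),
          Int.ediv_eq_zero_of_lt (by omega) (by omega), zero_add]
      rw [hmod, hdiv]
      have h1 : r.toNat = (r - 1).toNat + 1 := by omega
      rw [h1, show c / s = b from hbdef.symm,
        show n + 1 + 1 - ((r - 1).toNat + 1) = n + 1 - (r - 1).toNat from by omega,
        List.replicate_succ, List.cons_append]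

theorem calculate_adaptive_pool_sizes_py_eq (c t : Int) (ht : t ≠ 0) :
    calculate_adaptive_pool_sizes_py c t = calculate_adaptive_pool_sizes_py_alt c t := by
  unfold calculate_adaptive_pool_sizes_py_alt
  rcases lt_or_gt_of_ne ht with hneg | hpos
  · -- t < 0: A returns [] (empty range); B's fuel t.toNat = 0 gives []
    have h't : t.toNat = 0 := by omega
    rw [pvA_eq_blocks c t ht, h't]
    have hm := PySem.Int.mod_neg_bounds c hneg
    have h1 : (PySem.Int.mod c t).toNat = 0 := by omega
    have h2 : (t - PySem.Int.mod c t).toNat = 0 := by omega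
    simp [h1, h2, pvGreedyAux]
  · -- t > 0
    obtain ⟨n, hn⟩ : ∃ n : Nat, t.toNat = n + 1 := ⟨t.toNat - 1, by omega⟩
    have hnt : (n : Int) + 1 = t := by omega
    rw [pvA_eq_blocks c t ht, hn, pvGreedy_eq_blocks n c, hnt]
    rw [PySem.Int.floordiv_eq_ediv_of_pos hpos, PySem.Int.mod_eq_emod_of_pos hpos]
    have hr0 : 0 ≤ c % t := Int.emod_nonneg c ht
    have hr1 : c % t < t := Int.emod_lt_of_pos c hpos
    congr 1
    congr 1
    omega

-- ===== VERDICT (by name: the statement is the Claim_ definition above) =====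
theorem calculate_adaptive_pool_sizes_py_spec : Claim_equal_calculate_adaptive_pool_sizes_py := by
  intro c t _ hpre
  unfold Spec_calculate_adaptive_pool_sizes_py
  exact calculate_adaptive_pool_sizes_py_eq c t hpre
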